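-- pv_equiv track=rewrite | github.com/Qiskit/qiskit | tools/tomography.py | tomo_outcome_strings
-- ===== SOURCE A (Python) =====
-- def meas_outcome_strings(nq):
--     """
--     Returns a list of the measurement outcome strings for nq qubits.
--     """
--     return [bin(j)[2:].zfill(nq) for j in range(2**nq)]
--
-- def tomo_outcome_strings(meas_qubits,nq=None):
--     """
--     Returns a list of the measurement outcome strings for meas_qubits qubits in an
--     nq qubit system.
--     """
--     if nq is None:
--         nq = len(meas_qubits)
--     qs = sorted(meas_qubits, reverse=True)
--     outs = meas_outcome_strings(len(qs))
--     res = [];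
--     for s in outs:
--         label = ""
--         for j in range(nq):
--             if j in qs:
--                 label = s[qs.index(j)] + label
--             else:
--                 label = str(0) + label
--         res.append(label)
--     return res
-- ===== SOURCE B (Python) =====
-- def tomo_outcome_strings(meas_qubits, nq=None):
--     """
--     Returns a list of the measurement outcome strings for meas_qubits qubits in an
--     nq qubit system.
--     """
--     if nq is None:
--         nq = len(meas_qubits)
--     asc = sorted(meas_qubits)
--     res = []
--     for i in range(2 ** len(asc)):
--         bits = ["0"] * nq
--         for k, q in enumerate(asc):
--             if 0 <= q < nq:
--                 bits[nq - 1 - q] = "1" if (i >> k) & 1 else "0"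
--         res.append("".join(bits))
--     return res
-- ===== Notes on version B (the rewrite author's own statement) =====
-- stated objective: alternative
-- what changed: Instead of scanning every position j in range(nq) with an 'j in qs' membership test and a qs.index(j) scan inside (building each label by string prepending), B sorts ascending and scatters only the measured qubits into a preinitialised '0' template indexed by the bits of the outcome counter.
import Mathlib
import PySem

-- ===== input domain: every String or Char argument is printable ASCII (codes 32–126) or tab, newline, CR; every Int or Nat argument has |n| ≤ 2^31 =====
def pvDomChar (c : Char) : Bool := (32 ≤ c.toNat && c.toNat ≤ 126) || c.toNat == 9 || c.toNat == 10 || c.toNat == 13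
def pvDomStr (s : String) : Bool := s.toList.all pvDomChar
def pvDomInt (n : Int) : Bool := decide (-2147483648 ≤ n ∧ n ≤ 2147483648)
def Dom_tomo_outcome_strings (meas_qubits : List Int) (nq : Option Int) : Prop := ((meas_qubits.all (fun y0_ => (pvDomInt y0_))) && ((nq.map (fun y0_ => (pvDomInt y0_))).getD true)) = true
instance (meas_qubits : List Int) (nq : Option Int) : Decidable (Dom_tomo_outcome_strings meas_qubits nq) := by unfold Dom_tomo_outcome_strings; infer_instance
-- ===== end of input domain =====

-- B replaces A's scan of every position (with membership test and list.index inside) by a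
-- scatter of the measured qubits into a '0'-filled template, indexed by the bits of the counter
-- (objective: alternative decomposition; same exponential output size dominates the cost).

-- ===== PORT A =====

-- bin(j)[2:] for j ≥ 1, digit by digit (exact port of CPython's binary digits)
def pvBinDigits : Nat → List Char
  | 0 => []
  | (n+1) => pvBinDigits ((n+1)/2) ++ [if (n+1) % 2 = 1 then '1' else '0']
decreasing_by exact Nat.div_lt_self (Nat.succ_pos n) (by omega)

-- bin(j)[2:] for j ≥ 0 (bin(0)[2:] = "0")
def pvBin (j : Nat) : List Char := if j = 0 then ['0'] else pvBinDigits j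

-- meas_outcome_strings(nq) = [bin(j)[2:].zfill(nq) for j in range(2**nq)]
def meas_outcome_strings (nq : Nat) : List (List Char) :=
  (List.range (2 ^ nq)).map (fun j => PySem.Chars.zfill (pvBin j) (nq : Int))

def tomo_outcome_strings (meas_qubits : List Int) (nq : Option Int) : List String :=
  let n : Int := nq.getD (meas_qubits.length : Int)
  let qs : List Int := PySem.List.sorted meas_qubits (fun x => x) true
  let outs := meas_outcome_strings qs.length
  outs.map (fun s =>
    String.ofList ((PySem.List.pyRange 0 n 1).foldl (fun label j =>
      if qs.contains j then
        -- s[qs.index(j)]: j ∈ qs, so index? = some k with k < len qs = len s; the defaults are unreachable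
        (PySem.Chars.pyGet? s (((PySem.List.index? qs j).getD 0 : Nat) : Int)).getD '0' :: label
      else '0' :: label) []))

-- ===== PORT B =====
def tomo_outcome_strings_alt (meas_qubits : List Int) (nq : Option Int) : List String :=
  let n : Int := nq.getD (meas_qubits.length : Int)
  let asc : List Int := PySem.List.sorted meas_qubits (fun x => x)
  (List.range (2 ^ asc.length)).map (fun i =>
    String.ofList ((PySem.List.enumerate asc).foldl (fun bits kq =>
      if 0 ≤ kq.2 ∧ kq.2 < n then
        PySem.List.pySetD bits (n - 1 - kq.2) (if (i >>> kq.1.toNat) &&& 1 = 1 then '1' else '0')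
      else bits) (List.replicate n.toNat '0')))

-- ===== PRECONDITION & SPEC =====
def Spec_tomo_outcome_strings (meas_qubits : List Int) (nq : Option Int) (out : List String) : Prop := out = tomo_outcome_strings_alt meas_qubits nq
instance (meas_qubits : List Int) (nq : Option Int) (out : List String) : Decidable (Spec_tomo_outcome_strings meas_qubits nq out) := by unfold Spec_tomo_outcome_strings; infer_instance

-- ===== CLAIM (what is proved, stated in full; the proofs are below) =====
def Claim_equal_tomo_outcome_strings : Prop := ∀ (meas_qubits : List Int) (nq : Option Int), Dom_tomo_outcome_strings meas_qubits nq → Spec_tomo_outcome_strings meas_qubits nq (tomo_outcome_strings meas_qubits nq)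

-- ===== LEMMAS AND PROOFS =====

-- the MSB-first m-bit binary string of i (proof-side description of what both ports build)
def pvBitstr : Nat → Nat → List Char
  | 0, _ => []
  | (m+1), i => pvBitstr m (i/2) ++ [if i % 2 = 1 then '1' else '0']

theorem pvBitstr_length (m i : Nat) : (pvBitstr m i).length = m := by
  induction m generalizing i with
  | zero => rfl
  | succ m ih => simp [pvBitstr, ih]

theorem pvBitstr_getElem? (m i k : Nat) (hk : k < m) :
    (pvBitstr m i)[k]? = some (if i.testBit (m-1-k) then '1' else '0') := by
  induction m generalizing i k with
  | zero => omega
  | succ m ih =>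
    by_cases h : k < m
    · rw [pvBitstr, List.getElem?_append_left (by rw [pvBitstr_length]; exact h), ih _ _ h]
      have h2 : (i/2).testBit (m-1-k) = i.testBit (m-1-k+1) := Nat.testBit_div_two ..
      have h3 : m-1-k+1 = m+1-1-k := by omega
      rw [h2, h3]
    · have hk' : k = m := by omega
      subst hk'
      rw [pvBitstr, List.getElem?_append_right (by rw [pvBitstr_length])]
      simp [pvBitstr_length, Nat.testBit_zero]

theorem pvBinDigits_pos (i : Nat) (h : i ≠ 0) :
    pvBinDigits i = pvBinDigits (i/2) ++ [if i % 2 = 1 then '1' else '0'] := by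
  match i, h with
  | (n+1), _ => rw [pvBinDigits]

theorem pvBinDigits_chars (i : Nat) : ∀ c ∈ pvBinDigits i, c = '0' ∨ c = '1' := by
  induction i using Nat.strong_induction_on with
  | _ i ih =>
    match i with
    | 0 => simp [pvBinDigits]
    | (n+1) =>
      intro c hc
      rw [pvBinDigits] at hc
      rcases List.mem_append.mp hc with h | h
      · exact ih _ (Nat.div_lt_self (Nat.succ_pos n) (by omega)) c h
      · simp at h; split at h <;> simp [h]

theorem pvBin_chars (i : Nat) : ∀ c ∈ pvBin i, c = '0' ∨ c = '1' := by
  unfold pvBin; split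
  · simp
  · exact pvBinDigits_chars i

theorem pvBin_ne_nil (i : Nat) : pvBin i ≠ [] := by
  unfold pvBin; split
  · simp
  · rename_i h
    match i, h with
    | (n+1), _ => rw [pvBinDigits]; simp

theorem pv_zfill_digits (cs : List Char) (h : ∀ c ∈ cs, c = '0' ∨ c = '1') (hne : cs ≠ []) (w : Int) :
    PySem.Chars.zfill cs w = List.replicate (w.toNat - cs.length) '0' ++ cs := by
  unfold PySem.Chars.zfill
  split
  · rename_i hle
    have : w.toNat - cs.length = 0 := by omega
    simp [this]
  · match cs, hne with
    | c :: rest, _ =>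
      have hc := h c (by simp)
      have : ¬ (c = '+' ∨ c = '-') := by rcases hc with h1 | h1 <;> simp [h1]
      simp [this]

theorem pv_padBin (m : Nat) : ∀ i, 1 ≤ m → i < 2 ^ m →
    List.replicate (m - (pvBin i).length) '0' ++ pvBin i = pvBitstr m i := by
  induction m with
  | zero => omega
  | succ m ih =>
    intro i _ hi
    by_cases hm : m = 0
    · subst hm
      interval_cases i <;> simp [pvBin, pvBitstr, pvBinDigits]
    · have hm1 : 1 ≤ m := by omega
      have hdiv : i / 2 < 2 ^ m := by
        rw [Nat.pow_succ] at hi; omega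
      rw [pvBitstr, ← ih (i/2) hm1 hdiv]
      have hrep : List.replicate m '0' = List.replicate (m-1) '0' ++ ['0'] := by
        conv_lhs => rw [show m = (m-1)+1 from by omega]
        rw [List.replicate_succ']
      by_cases h0 : i = 0
      · subst h0
        simp [pvBin, hrep]
      · by_cases h1 : i = 1
        · subst h1
          simp [pvBin, pvBinDigits_pos 1 (by omega), pvBinDigits, hrep]
        · have hq : i / 2 ≠ 0 := by omega
          rw [show pvBin i = pvBin (i/2) ++ [if i % 2 = 1 then '1' else '0'] from by
            simp [pvBin, h0, hq]; exact pvBinDigits_pos i h0]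
          rw [List.length_append, ← List.append_assoc]
          congr 1
          congr 1
          simp

theorem pv_zfill_pvBin (m i : Nat) (hm : 1 ≤ m) (hi : i < 2 ^ m) :
    PySem.Chars.zfill (pvBin i) (m : Int) = pvBitstr m i := by
  rw [pv_zfill_digits (pvBin i) (pvBin_chars i) (pvBin_ne_nil i)]
  rw [Int.toNat_natCast]
  exact pv_padBin m i hm hi

-- sorted(xs, reverse=True) is the reversal of sorted(xs) for Int values
theorem pv_sorted_rev_eq_reverse (xs : List Int) :
    PySem.List.sorted xs (fun x => x) true = (PySem.List.sorted xs (fun x => x)).reverse := by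
  apply PySem.List.eq_of_perm_of_pairwise_le_of_injective (fun x : Int => -x)
  · intro a b h; simpa using h
  · exact (PySem.List.sorted_perm xs _ true).trans
      ((PySem.List.sorted_perm xs _ false).symm.trans (List.reverse_perm _).symm)
  · exact (PySem.List.sorted_pairwise_rev xs _).imp (fun h => by omega)
  · rw [List.pairwise_reverse]
    exact (PySem.List.sorted_pairwise xs _).imp (fun h => by omega)

theorem pv_foldl_branch_cons (l : List Int) (P : Int → Bool) (f g : Int → Char) (init : List Char) :
    l.foldl (fun acc j => if P j then f j :: acc else g j :: acc) init
      = (l.map (fun j => if P j then f j else g j)).reverse ++ init := by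
  induction l generalizing init with
  | nil => simp
  | cons x t ih =>
    simp only [List.foldl_cons, List.map_cons, List.reverse_cons, List.append_assoc, ih]
    by_cases h : P x <;> simp [h]

theorem pv_scatter_length (n : Int) (i : Nat) (l : List (Int × Int)) (bits : List Char) :
    (l.foldl (fun bits kq =>
      if 0 ≤ kq.2 ∧ kq.2 < n then
        PySem.List.pySetD bits (n - 1 - kq.2) (if (i >>> kq.1.toNat) &&& 1 = 1 then '1' else '0')
      else bits) bits).length = bits.length := by
  induction l generalizing bits with
  | nil => rfl
  | cons x t ih =>
    simp only [List.foldl_cons]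
    rw [ih]
    split
    · exact PySem.List.length_pySetD ..
    · rfl

-- last write wins: position p of the scatter is decided by the first occurrence of the
-- qubit value n-1-p in asc.reverse (= the last occurrence in asc)
theorem pv_scatter_get (n : Int) (i : Nat) (asc : List Int) (p : Nat) (hp : p < n.toNat) :
    ((PySem.List.enumerate asc).foldl (fun bits kq =>
      if 0 ≤ kq.2 ∧ kq.2 < n then
        PySem.List.pySetD bits (n - 1 - kq.2) (if (i >>> kq.1.toNat) &&& 1 = 1 then '1' else '0')
      else bits) (List.replicate n.toNat '0'))[p]?
    = some (match PySem.List.index? asc.reverse (n - 1 - (p : Int)) with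
            | some d => if (i >>> (asc.length - 1 - d)) &&& 1 = 1 then '1' else '0'
            | none => '0') := by
  have hq0 : 0 ≤ n - 1 - (p : Int) := by omega
  have hqn : n - 1 - (p : Int) < n := by omega
  induction asc using List.reverseRecOn with
  | nil =>
    simp [PySem.List.enumerate, hp, PySem.List.index?]
  | append_singleton l x ih =>
    rw [PySem.List.enumerate_append, List.foldl_append]
    have hone : PySem.List.enumerate [x] (0 + (l.length : Int)) = [((l.length : Int), x)] := by
      norm_num [PySem.List.enumerate]
    rw [hone]
    simp only [List.foldl_cons, List.foldl_nil]
    have hlen : (((PySem.List.enumerate l).foldl (fun bits kq =>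
      if 0 ≤ kq.2 ∧ kq.2 < n then
        PySem.List.pySetD bits (n - 1 - kq.2) (if (i >>> kq.1.toNat) &&& 1 = 1 then '1' else '0')
      else bits) (List.replicate n.toNat '0'))).length = n.toNat := by
      rw [pv_scatter_length]; simp
    rw [List.reverse_append]
    simp only [List.reverse_cons, List.reverse_nil, List.nil_append, List.singleton_append]
    by_cases hx : x = n - 1 - (p : Int)
    · subst hx
      rw [if_pos ⟨hq0, hqn⟩]
      have h1 : n - 1 - (n - 1 - (p : Int)) = ((p : Nat) : Int) := by omega
      rw [h1, PySem.List.pySetD_natCast, List.getElem?_set_self (by rw [hlen]; exact hp)]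
      rw [PySem.List.index?_cons_self]
      simp
    · rw [PySem.List.index?_cons_of_ne _ hx]
      have hstep : ∀ bits : List Char, bits.length = n.toNat →
          ((if 0 ≤ x ∧ x < n then
            PySem.List.pySetD bits (n - 1 - x) (if (i >>> ((l.length : Int)).toNat) &&& 1 = 1 then '1' else '0')
          else bits))[p]? = bits[p]? := by
        intro bits hb
        split
        · rename_i hc
          have h2 : n - 1 - x = (((n - 1 - x).toNat : Nat) : Int) := by omega
          rw [h2, PySem.List.pySetD_natCast]
          refine List.getElem?_set_ne ?_
          intro hcon
          apply hx
          omega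
        · rfl
      rw [hstep _ hlen, ih]
      cases h : PySem.List.index? l.reverse (n - 1 - (p : Int)) with
      | none => simp
      | some d =>
        simp only [Option.map_some]
        have harith : l.length - 1 - d = (l ++ [x]).length - 1 - (d + 1) := by
          simp; omega
        rw [harith]

theorem pv_bitChar (i k : Nat) :
    (if i.testBit k then '1' else '0') = (if (i >>> k) &&& 1 = 1 then '1' else '0') := by
  rcases Nat.mod_two_eq_zero_or_one (i >>> k) with h | h <;>
    simp [Nat.testBit, Nat.one_and_eq_mod_two, Nat.and_one_is_mod, h]

-- row-by-row equality of the two ports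
theorem pv_row_eq (n : Int) (asc : List Int) (i : Nat) (hi : i < 2 ^ asc.length) :
    (PySem.List.pyRange 0 n 1).foldl (fun label j =>
      if (asc.reverse).contains j then
        (PySem.Chars.pyGet? (PySem.Chars.zfill (pvBin i) (asc.length : Int))
          (((PySem.List.index? asc.reverse j).getD 0 : Nat) : Int)).getD '0' :: label
      else '0' :: label) []
    = (PySem.List.enumerate asc).foldl (fun bits kq =>
      if 0 ≤ kq.2 ∧ kq.2 < n then
        PySem.List.pySetD bits (n - 1 - kq.2) (if (i >>> kq.1.toNat) &&& 1 = 1 then '1' else '0')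
      else bits) (List.replicate n.toNat '0') := by
  rw [pv_foldl_branch_cons, List.append_nil]
  apply List.ext_getElem?
  intro p
  by_cases hp : p < n.toNat
  · rw [pv_scatter_get n i asc p hp]
    have hlm : ((PySem.List.pyRange 0 n 1).map (fun j =>
        if (asc.reverse).contains j then
          (PySem.Chars.pyGet? (PySem.Chars.zfill (pvBin i) (asc.length : Int))
            (((PySem.List.index? asc.reverse j).getD 0 : Nat) : Int)).getD '0'
        else '0')).length = n.toNat := by
      simp [PySem.List.length_pyRange_one]
    rw [List.getElem?_reverse (by rw [hlm]; exact hp)]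
    rw [hlm, List.getElem?_map, PySem.List.getElem?_pyRange_one]
    rw [if_pos (by omega)]
    simp only [Option.map_some]
    have hq : (0 : Int) + ((n.toNat - 1 - p : Nat) : Int) = n - 1 - (p : Int) := by omega
    rw [hq]
    by_cases hmem : (n - 1 - (p : Int)) ∈ asc.reverse
    · rw [if_pos (by simpa using hmem)]
      obtain ⟨d, hd⟩ := Option.isSome_iff_exists.mp
        ((PySem.List.index?_isSome_iff _ _).mpr hmem)
      obtain ⟨hdlt, -, -⟩ := PySem.List.getElem_of_index?_eq_some hd
      rw [List.length_reverse] at hdlt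
      have hm1 : 1 ≤ asc.length := by omega
      rw [hd]
      simp only [Option.getD_some]
      rw [pv_zfill_pvBin _ _ hm1 hi]
      have hpg : PySem.Chars.pyGet? (pvBitstr asc.length i) (d : Int)
          = (pvBitstr asc.length i)[d]? := by
        simp [PySem.Chars.pyGet?]
      rw [hpg, pvBitstr_getElem? _ _ _ hdlt]
      simp only [Option.getD_some]
      rw [pv_bitChar]
    · rw [if_neg (by simpa using hmem)]
      rw [(PySem.List.index?_eq_none_iff _ _).mpr hmem]
  · rw [List.getElem?_eq_none, List.getElem?_eq_none]
    · rw [pv_scatter_length]; simp; omega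
    · simp [PySem.List.length_pyRange_one]; omega

-- ===== VERDICT (by name: the statement is the Claim_ definition above) =====
theorem tomo_outcome_strings_spec : Claim_equal_tomo_outcome_strings := by
  intro mq nq _
  unfold Spec_tomo_outcome_strings tomo_outcome_strings tomo_outcome_strings_alt
  simp only [pv_sorted_rev_eq_reverse, List.length_reverse]
  unfold meas_outcome_strings
  rw [List.map_map]
  apply List.map_congr_left
  intro i hi
  simp only [Function.comp]
  congr 1
  exact pv_row_eq _ _ _ (List.mem_range.mp hi)
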